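-- pv_equiv track=rewrite | github.com/robertbrewer84/Synthesis-of-Magic-Card-Tricks | code/mr_synthesis_stochastic.py | verifyOnExamples
-- ===== SOURCE A (Python) =====
-- def verifyOnExamples(trick, audience, examples):
--     results = []
--     for i in examples:
--         success = True
--         if trick:
--             cut = trick[i%(len(trick)):] + trick[:i%(len(trick))]
--             for j in range(1,len(cut)+1-audience):
--                 if cut[0:audience] == cut[j:j+audience]:
--                     success = False
--         results.append(success)
--     return results
-- ===== SOURCE B (Python) =====
-- def verifyOnExamples(trick, audience, examples):
--     # Memoize the prefix-repetition check per distinct rotation r = i % len(trick),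
--     # so the scan runs once per rotation instead of once per example.
--     if not trick:
--         return [True] * len(examples)
--     n = len(trick)
--     cache = {}
--     def check(r):
--         cut = trick[r:] + trick[:r]
--         prefix = cut[0:audience]
--         return not any(prefix == cut[j:j + audience] for j in range(1, n + 1 - audience))
--     out = []
--     for i in examples:
--         r = i % n
--         if r not in cache:
--             cache[r] = check(r)
--         out.append(cache[r])
--     return out
-- ===== Notes on version B (the rewrite author's own statement) =====
-- stated objective: faster
-- what changed: B memoizes the prefix-repetition check per distinct rotation r = i % len(trick) in a dict built on the fly (and uses an early-exit any over the shifted windows), so the O(n*audience) scan runs once per distinct rotation instead of once per example.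
import Mathlib
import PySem

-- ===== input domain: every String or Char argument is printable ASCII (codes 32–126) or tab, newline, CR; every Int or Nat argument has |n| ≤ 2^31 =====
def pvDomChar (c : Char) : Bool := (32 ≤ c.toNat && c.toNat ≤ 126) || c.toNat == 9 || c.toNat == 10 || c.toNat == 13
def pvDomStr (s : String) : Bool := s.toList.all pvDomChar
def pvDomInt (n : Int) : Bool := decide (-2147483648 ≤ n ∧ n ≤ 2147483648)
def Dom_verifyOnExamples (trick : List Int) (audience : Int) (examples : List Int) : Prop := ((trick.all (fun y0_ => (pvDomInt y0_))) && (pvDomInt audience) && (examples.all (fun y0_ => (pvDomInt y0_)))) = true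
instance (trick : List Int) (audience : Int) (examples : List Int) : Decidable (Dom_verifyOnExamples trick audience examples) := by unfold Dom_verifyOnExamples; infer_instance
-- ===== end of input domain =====

-- ===== PORT A =====
-- B memoizes the per-rotation prefix-repetition check in a dict, one scan per distinct rotation.
def verifyOnExamples (trick : List Int) (audience : Int) (examples : List Int) : List Bool :=
  examples.foldl (fun results i =>
    let success : Bool :=
      if trick.isEmpty then true
      else
        let r := PySem.Int.mod i (trick.length : Int)
        let cut := PySem.List.slice trick (some r) none ++ PySem.List.slice trick none (some r)
        (PySem.List.pyRange 1 ((cut.length : Int) + 1 - audience) 1).foldl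
          (fun success j =>
            if PySem.List.slice cut (some 0) (some audience)
                 == PySem.List.slice cut (some j) (some (j + audience))
            then false else success) true
    results ++ [success]) []

-- ===== PORT B =====
def pvCheck (trick : List Int) (audience : Int) (n : Int) (r : Int) : Bool :=
  let cut := PySem.List.slice trick (some r) none ++ PySem.List.slice trick none (some r)
  let pre := PySem.List.slice cut (some 0) (some audience)
  !((PySem.List.pyRange 1 (n + 1 - audience) 1).any
      (fun j => pre == PySem.List.slice cut (some j) (some (j + audience))))

def pvLoop (trick : List Int) (audience : Int) (n : Int) :
    List Int → PySem.Dict Int Bool → List Bool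
  | [], _ => []
  | i :: rest, cache =>
    let r := PySem.Int.mod i n
    match cache.get? r with
    | some v => v :: pvLoop trick audience n rest cache
    | none =>
        let v := pvCheck trick audience n r
        v :: pvLoop trick audience n rest (cache.insert r v)

def verifyOnExamples_alt (trick : List Int) (audience : Int) (examples : List Int) : List Bool :=
  if trick.isEmpty then List.replicate examples.length true
  else pvLoop trick audience (trick.length : Int) examples PySem.Dict.empty

-- ===== PRECONDITION & SPEC =====
def Spec_verifyOnExamples (trick : List Int) (audience : Int) (examples : List Int) (out : List Bool) : Prop := out = verifyOnExamples_alt trick audience examples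
instance (trick : List Int) (audience : Int) (examples : List Int) (out : List Bool) : Decidable (Spec_verifyOnExamples trick audience examples out) := by unfold Spec_verifyOnExamples; infer_instance

-- ===== CLAIM (what is proved, stated in full; the proofs are below) =====
def Claim_equal_verifyOnExamples : Prop := ∀ (trick : List Int) (audience : Int) (examples : List Int), Dom_verifyOnExamples trick audience examples → Spec_verifyOnExamples trick audience examples (verifyOnExamples trick audience examples)

-- ===== LEMMAS AND PROOFS =====

-- A's set-a-flag-and-keep-scanning inner loop computes "no window matched".
theorem foldl_flag (c : Int → Bool) (l : List Int) (s : Bool) :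
    l.foldl (fun s j => if c j then false else s) s = (s && !(l.any c)) := by
  induction l generalizing s with
  | nil => simp
  | cons x xs ih =>
    simp only [List.foldl, List.any_cons]
    cases h : c x
    · rw [if_neg (by simp), ih]; simp
    · rw [if_pos (by simp), ih]; simp

-- The cached loop returns the per-rotation check, given every cache entry is correct.
theorem pvLoop_map (trick : List Int) (audience n : Int) (l : List Int)
    (cache : PySem.Dict Int Bool)
    (h : ∀ k v, cache.get? k = some v → v = pvCheck trick audience n k) :
    pvLoop trick audience n l cache
      = l.map (fun i => pvCheck trick audience n (PySem.Int.mod i n)) := by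
  induction l generalizing cache with
  | nil => rfl
  | cons i rest ih =>
    simp only [pvLoop, List.map]
    cases hg : cache.get? (PySem.Int.mod i n) with
    | some v =>
      dsimp only
      rw [h _ _ hg, ih cache h]
    | none =>
      dsimp only
      rw [ih]
      intro k v hk
      rw [PySem.Dict.get?_insert] at hk
      split at hk
      · next heq => cases hk; rw [heq]
      · exact h _ _ hk

theorem cut_length (trick : List Int) (i : Int) (hne : trick ≠ []) :
    (PySem.List.slice trick (some (PySem.Int.mod i (trick.length : Int))) none
      ++ PySem.List.slice trick none (some (PySem.Int.mod i (trick.length : Int)))).length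
      = trick.length := by
  have hpos : (0 : Int) < (trick.length : Int) := by
    have := List.length_pos_iff.mpr hne; exact_mod_cast this
  have h0 : 0 ≤ PySem.Int.mod i (trick.length : Int) := PySem.Int.mod_nonneg _ hpos
  have hlt : PySem.Int.mod i (trick.length : Int) < (trick.length : Int) :=
    PySem.Int.mod_lt _ hpos
  set r := PySem.Int.mod i (trick.length : Int) with hr
  have hcast : r = ((r.toNat : Nat) : Int) := (Int.toNat_of_nonneg h0).symm
  rw [hcast, PySem.List.slice_from_natCast, PySem.List.slice_to_natCast]
  have : r.toNat < trick.length := by omega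
  simp [List.length_drop, List.length_take]
  omega

-- ===== VERDICT (by name: the statement is the Claim_ definition above) =====
theorem verifyOnExamples_spec : Claim_equal_verifyOnExamples := by
  intro trick audience examples _
  unfold Spec_verifyOnExamples verifyOnExamples verifyOnExamples_alt
  rw [PySem.List.foldl_append_singleton_eq_map]
  by_cases he : trick = []
  · subst he
    simp [List.isEmpty_nil, List.map_const']
  · have hne : trick.isEmpty = false := by simp [he]
    rw [if_neg (by simp [hne]), pvLoop_map _ _ _ _ _ (by simp [PySem.Dict.get?_empty])]
    apply List.map_congr_left
    intro i _
    simp only [hne, if_false, Bool.false_eq_true]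
    rw [foldl_flag, cut_length trick i he]
    simp [pvCheck]
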